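-- pv_equiv track=rewrite | github.com/Jackbar21/Leetcode | 2408-number-of-people-aware-of-a-secret/number-of-people-aware-of-a-secret.py | peopleAwareOfSecretAttempt
-- ===== SOURCE A (Python) =====
-- def peopleAwareOfSecretAttempt(n: int, delay: int, forget: int) -> int:
--     # Brute Force
--     MOD = pow(10, 9) + 7
--     queue = [(delay, forget)]
--
--     for i in range(n - 1):
--         # Each person in the queue goes through a day
--         new_queue = []
--
--         while queue:
--             d, f = queue.pop()
--             d -= 1
--             f -= 1
--             if f == 0:
--                 continue
--             if d <= 0:
--                 new_queue.append((delay, forget))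
--             new_queue.append((d, f))
--
--         queue = new_queue
--
--     return len(queue) % MOD
-- ===== SOURCE B (Python) =====
-- def peopleAwareOfSecretAttempt(n: int, delay: int, forget: int) -> int:
--     # Count people grouped by days-left-until-forgetting instead of simulating
--     # each person: every person in A's queue satisfies d == f - (forget - delay),
--     # so the state is fully described by f; keep a dict f -> number of people.
--     MOD = pow(10, 9) + 7
--     counts = {forget: 1}
--
--     for _ in range(n - 1):
--         nxt = {}
--         for f, cnt in counts.items():
--             f -= 1
--             if f == 0:
--                 continue
--             if f <= forget - delay:
--                 nxt[forget] = nxt.get(forget, 0) + cnt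
--             nxt[f] = nxt.get(f, 0) + cnt
--         counts = nxt
--
--     return sum(counts.values()) % MOD
-- ===== Notes on version B (the rewrite author's own statement) =====
-- stated objective: alternative
-- what changed: B replaces A's per-person queue simulation (one tuple per aware person) by a per-day dict mapping days-left-until-forgetting to the number of people in that state, exploiting the invariant d = f - (forget - delay); each day folds over the count groups instead of over individual people.
import Mathlib
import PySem

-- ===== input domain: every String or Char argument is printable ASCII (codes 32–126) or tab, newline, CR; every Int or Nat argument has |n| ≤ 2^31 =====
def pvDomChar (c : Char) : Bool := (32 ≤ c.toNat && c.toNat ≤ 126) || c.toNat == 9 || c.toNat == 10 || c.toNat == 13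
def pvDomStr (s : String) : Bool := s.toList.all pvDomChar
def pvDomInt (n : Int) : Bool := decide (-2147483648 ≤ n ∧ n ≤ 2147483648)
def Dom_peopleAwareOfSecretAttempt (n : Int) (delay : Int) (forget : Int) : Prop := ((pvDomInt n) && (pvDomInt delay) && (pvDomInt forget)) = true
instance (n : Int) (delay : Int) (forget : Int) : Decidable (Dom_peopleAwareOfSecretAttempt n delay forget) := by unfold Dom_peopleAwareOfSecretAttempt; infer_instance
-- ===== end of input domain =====

-- B replaces A's per-person queue simulation (one tuple per aware person) by a per-day
-- dict of counts keyed by days-left-until-forgetting (grouping identically-behaving people).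

-- ===== PORT A =====
-- the `while queue:` loop: Python's queue.pop() takes the LAST element, so we walk the reversed list
def pvPopLoop (delay forget : Int) : List (Int × Int) → List (Int × Int) → List (Int × Int)
  | [], newq => newq
  | (d, f) :: rest, newq =>
    let d := d - 1
    let f := f - 1
    if f = 0 then pvPopLoop delay forget rest newq
    else if d ≤ 0 then pvPopLoop delay forget rest (newq ++ [(delay, forget), (d, f)])
    else pvPopLoop delay forget rest (newq ++ [(d, f)])

def peopleAwareOfSecretAttempt (n : Int) (delay : Int) (forget : Int) : Int :=
  let MOD : Int := 10 ^ 9 + 7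
  let queue : List (Int × Int) := [(delay, forget)]
  let queue := (PySem.List.pyRange 0 (n - 1) 1).foldl
    (fun queue _ => pvPopLoop delay forget queue.reverse []) queue
  PySem.Int.mod (PySem.List.len queue) MOD

-- ===== PORT B =====
-- one day of B: fold over counts.items building the next dict
def pvDayStep (delay forget : Int) (counts : PySem.Dict Int Int) : PySem.Dict Int Int :=
  counts.items.foldl
    (fun nxt p =>
      let f := p.1 - 1
      let cnt := p.2
      if f = 0 then nxt
      else
        let nxt := if f ≤ forget - delay then nxt.insert forget (nxt.getD forget 0 + cnt) else nxt
        nxt.insert f (nxt.getD f 0 + cnt))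
    PySem.Dict.empty

def peopleAwareOfSecretAttempt_alt (n : Int) (delay : Int) (forget : Int) : Int :=
  let MOD : Int := 10 ^ 9 + 7
  let counts : PySem.Dict Int Int := PySem.Dict.empty.insert forget 1
  let counts := (PySem.List.pyRange 0 (n - 1) 1).foldl
    (fun counts _ => pvDayStep delay forget counts) counts
  PySem.Int.mod counts.values.sum MOD

-- ===== PRECONDITION & SPEC =====
def Spec_peopleAwareOfSecretAttempt (n : Int) (delay : Int) (forget : Int) (out : Int) : Prop := out = peopleAwareOfSecretAttempt_alt n delay forget
instance (n : Int) (delay : Int) (forget : Int) (out : Int) : Decidable (Spec_peopleAwareOfSecretAttempt n delay forget out) := by unfold Spec_peopleAwareOfSecretAttempt; infer_instance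

-- ===== CLAIM (what is proved, stated in full; the proofs are below) =====
def Claim_equal_peopleAwareOfSecretAttempt : Prop := ∀ (n : Int) (delay : Int) (forget : Int), Dom_peopleAwareOfSecretAttempt n delay forget → Spec_peopleAwareOfSecretAttempt n delay forget (peopleAwareOfSecretAttempt n delay forget)

-- ===== LEMMAS AND PROOFS =====

-- what one person contributes to the next day's queue in A
def pvChildA (delay forget : Int) (p : Int × Int) : List (Int × Int) :=
  if p.2 - 1 = 0 then []
  else (if p.1 - 1 ≤ 0 then [(delay, forget)] else []) ++ [(p.1 - 1, p.2 - 1)]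

-- the same contribution seen only through f (valid when d = f - (forget - delay))
def pvChildF (c forget : Int) (f : Int) : List Int :=
  if f - 1 = 0 then [] else (if f - 1 ≤ c then [forget] else []) ++ [f - 1]

-- what one dict item contributes (as a multiset of f-values) in B's day step
def pvContrib (c forget : Int) (p : Int × Int) : List Int :=
  if p.1 - 1 = 0 then []
  else (if p.1 - 1 ≤ c then List.replicate p.2.toNat forget else []) ++ List.replicate p.2.toNat (p.1 - 1)

-- a dict item (f, cnt) seen as the multiset with cnt copies of f
def pvRepL (l : List (Int × Int)) : List Int := l.flatMap (fun p => List.replicate p.2.toNat p.1)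

theorem pvPopLoop_eq (delay forget : Int) (l acc : List (Int × Int)) :
    pvPopLoop delay forget l acc = acc ++ l.flatMap (pvChildA delay forget) := by
  induction l generalizing acc with
  | nil => simp [pvPopLoop]
  | cons p rest ih =>
    obtain ⟨d, f⟩ := p
    simp only [pvPopLoop, pvChildA, List.flatMap_cons]
    split_ifs <;> simp_all

theorem pvCount_repL_not_mem (l : List (Int × Int)) (x : Int) (hx : x ∉ l.map Prod.fst) :
    (pvRepL l).count x = 0 := by
  induction l with
  | nil => simp [pvRepL]
  | cons p rest ih =>
    simp only [List.map_cons, List.mem_cons, not_or] at hx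
    have hne : ¬ (p.1 = x) := fun h => hx.1 h.symm
    simp [pvRepL, List.count_append, List.count_replicate, hne]
    simpa [pvRepL] using ih hx.2

theorem pvCount_repL_mem (l : List (Int × Int)) (x v : Int)
    (hnd : (l.map Prod.fst).Nodup) (hv : (x, v) ∈ l) :
    (pvRepL l).count x = v.toNat := by
  induction l with
  | nil => simp at hv
  | cons p rest ih =>
    simp only [List.map_cons, List.nodup_cons] at hnd
    rcases List.mem_cons.mp hv with h | h
    · subst h
      simp [pvRepL, List.count_append, List.count_replicate]
      simpa [pvRepL] using pvCount_repL_not_mem rest x hnd.1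
    · have hne : p.1 ≠ x := by
        intro he
        exact hnd.1 (he ▸ List.mem_map.mpr ⟨(x, v), h, rfl⟩)
      simp [pvRepL, List.count_append, List.count_replicate, if_neg hne] at *
      exact ih hnd.2 h

theorem pvCount_rep (d : PySem.Dict Int Int) (hnd : d.keys.Nodup) (x : Int) :
    (pvRepL d.items).count x = (d.getD x 0).toNat := by
  by_cases hx : x ∈ d.keys
  · obtain ⟨p, hp, hpx⟩ := List.mem_map.mp hx
    obtain ⟨f, v⟩ := p
    cases hpx
    rw [PySem.Dict.getD_of_mem_items d hp hnd]
    exact pvCount_repL_mem _ _ _ hnd hp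
  · have hc : d.contains x = false := by
      rcases Bool.eq_false_or_eq_true (d.contains x) with h | h
      · exact absurd ((PySem.Dict.contains_iff_mem_keys d x).mp h) hx
      · exact h
    rw [PySem.Dict.getD_of_not_contains d 0 hc]
    simpa using pvCount_repL_not_mem d.items x hx

theorem pvGetD_nonneg (d : PySem.Dict Int Int) (hpos : ∀ p ∈ d.items, 0 ≤ p.2) (x : Int) :
    0 ≤ d.getD x 0 := by
  cases hg : d.get? x with
  | none => simp [PySem.Dict.getD_eq_get?_getD, hg]
  | some v =>
    have := hpos _ (PySem.Dict.mem_items_of_get?_eq_some d hg)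
    simpa [PySem.Dict.getD_eq_get?_getD, hg] using this

theorem pvPos_bump (d : PySem.Dict Int Int) (hpos : ∀ p ∈ d.items, 0 ≤ p.2)
    (k c : Int) (hc : 0 ≤ c) :
    ∀ p ∈ (d.insert k (d.getD k 0 + c)).items, 0 ≤ p.2 := by
  intro p hp
  rcases (PySem.Dict.mem_items_insert d k _ p).mp hp with h | h
  · subst h
    have := pvGetD_nonneg d hpos k
    simp; omega
  · exact hpos p h.1

theorem pvRep_bump (d : PySem.Dict Int Int) (hnd : d.keys.Nodup)
    (hpos : ∀ p ∈ d.items, 0 ≤ p.2) (k c : Int) (hc : 0 ≤ c) :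
    (pvRepL (d.insert k (d.getD k 0 + c)).items).Perm
      (pvRepL d.items ++ List.replicate c.toNat k) := by
  rw [List.perm_iff_count]
  intro x
  rw [pvCount_rep _ (PySem.Dict.nodup_keys_insert d k _ hnd) x, List.count_append,
    pvCount_rep d hnd x, PySem.Dict.getD_insert, List.count_replicate]
  have h0 := pvGetD_nonneg d hpos k
  by_cases hxk : x = k
  · subst hxk; simp; omega
  · have hkx : ¬ k = x := fun h => hxk h.symm
    simp [hxk, hkx]

-- B's inner fold, generalized over the starting dict
theorem pvDayFold (delay forget : Int) (l : List (Int × Int)) :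
    ∀ (nxt : PySem.Dict Int Int), nxt.keys.Nodup → (∀ p ∈ nxt.items, 0 ≤ p.2) →
    (∀ p ∈ l, 0 ≤ p.2) →
    (let r := l.foldl
      (fun nxt p =>
        let f := p.1 - 1
        let cnt := p.2
        if f = 0 then nxt
        else
          let nxt := if f ≤ forget - delay then nxt.insert forget (nxt.getD forget 0 + cnt) else nxt
          nxt.insert f (nxt.getD f 0 + cnt)) nxt
     (pvRepL r.items).Perm (pvRepL nxt.items ++ l.flatMap (pvContrib (forget - delay) forget))
       ∧ r.keys.Nodup ∧ (∀ p ∈ r.items, 0 ≤ p.2)) := by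
  induction l with
  | nil =>
    intro nxt h1 h2 _
    dsimp only
    exact ⟨by simp, h1, h2⟩
  | cons p rest ih =>
    intro nxt h1 h2 hl
    have hp : (0:Int) ≤ p.2 := hl p (List.mem_cons_self ..)
    have hrest : ∀ q ∈ rest, (0:Int) ≤ q.2 := fun q hq => hl q (List.mem_cons_of_mem _ hq)
    simp only [List.foldl_cons, List.flatMap_cons]
    by_cases hf : p.1 - 1 = 0
    · simp only [if_pos hf]
      have := ih nxt h1 h2 hrest
      simp only [pvContrib, if_pos hf] at *
      simpa using this
    · simp only [if_neg hf]
      by_cases hd : p.1 - 1 ≤ forget - delay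
      · simp only [if_pos hd]
        set d1 := nxt.insert forget (nxt.getD forget 0 + p.2) with hd1
        have h1' : d1.keys.Nodup := PySem.Dict.nodup_keys_insert _ _ _ h1
        have h2' : ∀ q ∈ d1.items, (0:Int) ≤ q.2 := pvPos_bump nxt h2 forget p.2 hp
        set d2 := d1.insert (p.1 - 1) (d1.getD (p.1 - 1) 0 + p.2) with hd2
        have h1'' : d2.keys.Nodup := PySem.Dict.nodup_keys_insert _ _ _ h1'
        have h2'' : ∀ q ∈ d2.items, (0:Int) ≤ q.2 := pvPos_bump d1 h2' (p.1 - 1) p.2 hp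
        obtain ⟨hperm, hnd, hpos⟩ := ih d2 h1'' h2'' hrest
        refine ⟨hperm.trans ?_, hnd, hpos⟩
        have b1 := pvRep_bump nxt h1 h2 forget p.2 hp
        have b2 := pvRep_bump d1 h1' h2' (p.1 - 1) p.2 hp
        have : (pvRepL d2.items).Perm
            (pvRepL nxt.items ++ (List.replicate p.2.toNat forget ++ List.replicate p.2.toNat (p.1 - 1))) := by
          refine b2.trans ?_
          have := b1.append_right (List.replicate p.2.toNat (p.1 - 1))
          simpa [List.append_assoc] using this
        refine (this.append_right _).trans ?_
        simp only [pvContrib, if_neg hf, if_pos hd, List.append_assoc]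
        exact List.Perm.refl _
      · simp only [if_neg hd]
        set d2 := nxt.insert (p.1 - 1) (nxt.getD (p.1 - 1) 0 + p.2) with hd2
        have h1'' : d2.keys.Nodup := PySem.Dict.nodup_keys_insert _ _ _ h1
        have h2'' : ∀ q ∈ d2.items, (0:Int) ≤ q.2 := pvPos_bump nxt h2 (p.1 - 1) p.2 hp
        obtain ⟨hperm, hnd, hpos⟩ := ih d2 h1'' h2'' hrest
        refine ⟨hperm.trans ?_, hnd, hpos⟩
        have b2 := pvRep_bump nxt h1 h2 (p.1 - 1) p.2 hp
        refine (b2.append_right _).trans ?_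
        simp only [pvContrib, if_neg hf, if_neg hd, List.append_assoc]
        simp

theorem pvCount_flatMap_replicate (n : Nat) (x : Int) (g : Int → List Int) (y : Int) :
    ((List.replicate n x).flatMap g).count y = n * (g x).count y := by
  induction n with
  | zero => simp
  | succ m ih => simp [List.replicate_succ, List.count_append, ih, Nat.succ_mul]; omega

-- one item's replicate, pushed through pvChildF, is pvContrib (up to permutation)
theorem pvReplicate_childF (c forget : Int) (p : Int × Int) :
    ((List.replicate p.2.toNat p.1).flatMap (pvChildF c forget)).Perm (pvContrib c forget p) := by
  rw [List.perm_iff_count]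
  intro y
  rw [pvCount_flatMap_replicate]
  by_cases hf : p.1 - 1 = 0
  · simp [pvChildF, pvContrib, hf]
  · simp only [pvChildF, pvContrib, if_neg hf]
    by_cases hd : p.1 - 1 ≤ c
    · simp only [if_pos hd]
      by_cases h1 : forget = y <;> by_cases h2 : p.1 - 1 = y <;>
        simp [List.count_append, List.count_replicate, List.count_cons, h1, h2] <;> omega
    · simp only [if_neg hd]
      by_cases h2 : p.1 - 1 = y <;>
        simp [List.count_replicate, List.count_cons, h2] <;> omega

-- B's day step, stated against the multiset expansion
theorem pvDayStep_rep (delay forget : Int) (m : PySem.Dict Int Int)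
    (hnd : m.keys.Nodup) (hpos : ∀ p ∈ m.items, 0 ≤ p.2) :
    (pvRepL (pvDayStep delay forget m).items).Perm
      ((pvRepL m.items).flatMap (pvChildF (forget - delay) forget))
    ∧ (pvDayStep delay forget m).keys.Nodup
    ∧ (∀ p ∈ (pvDayStep delay forget m).items, 0 ≤ p.2) := by
  obtain ⟨hperm, h1, h2⟩ := pvDayFold delay forget m.items PySem.Dict.empty
    (by simpa using PySem.Dict.nodup_keys_empty)
    (by simp [PySem.Dict.empty]) hpos
  refine ⟨?_, h1, h2⟩
  refine (hperm.trans ?_)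
  have : pvRepL (PySem.Dict.empty : PySem.Dict Int Int).items = [] := rfl
  rw [this, List.nil_append, pvRepL, List.flatMap_assoc]
  exact List.Perm.flatMap (List.Perm.refl m.items)
    (fun p _ => (pvReplicate_childF (forget - delay) forget p).symm)

-- A's day step: the new queue's f-values, and preservation of d = f - c
theorem pvChildA_inv (delay forget : Int) (p q : Int × Int)
    (hq : q ∈ pvChildA delay forget p) : q.1 = q.2 - (forget - delay) ∨ q = (p.1 - 1, p.2 - 1) := by
  simp only [pvChildA] at hq
  split_ifs at hq with h1 h2
  · simp at hq
  · rcases List.mem_append.mp hq with hq2 | hq2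
    · left
      simp only [List.mem_singleton] at hq2
      subst hq2
      simp
    · right
      simpa using hq2
  · right
    simpa using hq

theorem pvMap_snd_childA (delay forget : Int) (p : Int × Int)
    (hp : p.1 = p.2 - (forget - delay)) :
    (pvChildA delay forget p).map Prod.snd = pvChildF (forget - delay) forget p.2 := by
  have : p.1 - 1 ≤ 0 ↔ p.2 - 1 ≤ forget - delay := by omega
  simp only [pvChildA, pvChildF]
  split_ifs with h1 h2 h3 <;> simp_all <;> omega

-- the joint invariant tying A's queue to B's dict
def pvInv (c forget : Int) (q : List (Int × Int)) (m : PySem.Dict Int Int) : Prop :=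
  (∀ p ∈ q, p.1 = p.2 - c) ∧ (q.map Prod.snd).Perm (pvRepL m.items) ∧
    m.keys.Nodup ∧ (∀ p ∈ m.items, 0 ≤ p.2)

theorem pvDay_inv (delay forget : Int) (q : List (Int × Int)) (m : PySem.Dict Int Int)
    (h : pvInv (forget - delay) forget q m) :
    pvInv (forget - delay) forget (pvPopLoop delay forget q.reverse [])
      (pvDayStep delay forget m) := by
  obtain ⟨hq, hperm, hnd, hpos⟩ := h
  obtain ⟨bperm, bnd, bpos⟩ := pvDayStep_rep delay forget m hnd hpos
  rw [pvPopLoop_eq]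
  refine ⟨?_, ?_, bnd, bpos⟩
  · intro p hp
    simp only [List.nil_append, List.mem_flatMap] at hp
    obtain ⟨a, ha, hpa⟩ := hp
    rcases pvChildA_inv delay forget a p hpa with h | h
    · exact h
    · have := hq a (List.mem_reverse.mp ha)
      simp [h]; omega
  · simp only [List.nil_append, List.map_flatMap]
    have e1 : q.reverse.flatMap (fun a => (pvChildA delay forget a).map Prod.snd)
        = q.reverse.flatMap (fun a => pvChildF (forget - delay) forget a.2) := by
      apply List.flatMap_congr
      intro a ha
      exact pvMap_snd_childA delay forget a (hq a (List.mem_reverse.mp ha))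
    rw [e1]
    have e2 : (q.reverse.flatMap fun a => pvChildF (forget - delay) forget a.2).Perm
        ((q.map Prod.snd).flatMap (pvChildF (forget - delay) forget)) := by
      rw [List.flatMap_map] at *
      exact List.Perm.flatMap (q.reverse_perm) (fun a _ => List.Perm.refl _)
    refine e2.trans ?_
    exact (List.Perm.flatMap hperm (fun a _ => List.Perm.refl _)).trans bperm.symm

theorem pvFold_inv (delay forget : Int) (l : List Int) (q : List (Int × Int))
    (m : PySem.Dict Int Int) (h : pvInv (forget - delay) forget q m) :
    pvInv (forget - delay) forget
      (l.foldl (fun queue _ => pvPopLoop delay forget queue.reverse []) q)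
      (l.foldl (fun counts _ => pvDayStep delay forget counts) m) := by
  induction l generalizing q m with
  | nil => simpa using h
  | cons a rest ih => exact ih _ _ (pvDay_inv delay forget q m h)

theorem pvRepL_length (l : List (Int × Int)) (hpos : ∀ p ∈ l, 0 ≤ p.2) :
    ((pvRepL l).length : Int) = (l.map Prod.snd).sum := by
  induction l with
  | nil => simp [pvRepL]
  | cons p rest ih =>
    have hp := hpos p (List.mem_cons_self ..)
    have ih' := ih (fun q hq => hpos q (List.mem_cons_of_mem _ hq))
    simp only [pvRepL, List.flatMap_cons, List.length_append, List.length_replicate,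
      List.map_cons, List.sum_cons]
    simp only [pvRepL] at ih'
    push_cast
    omega

-- ===== VERDICT (by name: the statement is the Claim_ definition above) =====
theorem peopleAwareOfSecretAttempt_spec : Claim_equal_peopleAwareOfSecretAttempt := by
  intro n delay forget _
  unfold Spec_peopleAwareOfSecretAttempt peopleAwareOfSecretAttempt peopleAwareOfSecretAttempt_alt
  simp only []
  have hinit : pvInv (forget - delay) forget [(delay, forget)]
      ((PySem.Dict.empty : PySem.Dict Int Int).insert forget 1) := by
    refine ⟨by simp, ?_, PySem.Dict.nodup_keys_insert _ _ _
      (by simpa using PySem.Dict.nodup_keys_empty), ?_⟩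
    · have : ((PySem.Dict.empty : PySem.Dict Int Int).insert forget 1).items = [(forget, 1)] := rfl
      rw [this]
      simp [pvRepL, List.replicate]
    · have : ((PySem.Dict.empty : PySem.Dict Int Int).insert forget 1).items = [(forget, 1)] := rfl
      rw [this]; simp
  obtain ⟨_, hperm, _, hpos⟩ := pvFold_inv delay forget (PySem.List.pyRange 0 (n - 1) 1)
    [(delay, forget)] _ hinit
  set qf := (PySem.List.pyRange 0 (n - 1) 1).foldl
    (fun queue _ => pvPopLoop delay forget queue.reverse []) [(delay, forget)]
  set mf := (PySem.List.pyRange 0 (n - 1) 1).foldl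
    (fun counts _ => pvDayStep delay forget counts)
    ((PySem.Dict.empty : PySem.Dict Int Int).insert forget 1)
  have hlen : PySem.List.len qf = mf.values.sum := by
    rw [PySem.List.len_eq]
    have h1 : qf.length = (pvRepL mf.items).length := by
      have := hperm.length_eq
      simpa using this
    rw [h1, pvRepL_length mf.items hpos]
    rfl
  rw [hlen]
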